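-- pv_equiv track=rewrite | github.com/zhopkins360/zhopkins-MTH-Capstone-Appendix | solutionCalc.py | redundancy
-- ===== SOURCE A (Python) =====
-- def redundancy(vertArr, faceMatrix):
--     redund = 0
--     #check if it is a solution
--     if not solChecker(vertArr,faceMatrix):
--         return -1
--     #loops through each face
--     for face in faceMatrix:
--         #creates a holing val
--         numOfVertsToching = 0
--         #loops through vertices
--         for vert in vertArr:
--             #if the face is touching the vert increase holding var
--             if vert in face:
--                 numOfVertsToching += 1
--         #if the holding var is greater then 1 adds how many times the face is redundent
--         if numOfVertsToching > 1:
--             redund += 1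
--     return redund
--
-- def solChecker(vertArr, faceMatrix):
--     #loops through each face
--     for face in faceMatrix:
--         #makes a list comperhension of all the verts in vert array that it is toching
--         #then checks if the length is 0
--         if len([i for i in vertArr if i in face]) == 0:
--             #if it is then it returns false
--             return False
--     #if it runs through every face then it is true
--     return True
-- ===== SOURCE B (Python) =====
-- def redundancy(vertArr, faceMatrix):
--     redund = 0
--     for face in faceMatrix:
--         touching = sum(1 for v in vertArr if v in face)
--         if touching == 0:
--             return -1
--         if touching > 1:
--             redund += 1
--     return redund
-- ===== Notes on version B (the rewrite author's own statement) =====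
-- stated objective: faster
-- what changed: The separate solChecker validation pass over all faces is fused into the counting loop: one scan over faceMatrix counts touching vertices per face, returning -1 immediately on a zero-touch face, so faceMatrix is traversed once instead of twice.
import Mathlib
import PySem

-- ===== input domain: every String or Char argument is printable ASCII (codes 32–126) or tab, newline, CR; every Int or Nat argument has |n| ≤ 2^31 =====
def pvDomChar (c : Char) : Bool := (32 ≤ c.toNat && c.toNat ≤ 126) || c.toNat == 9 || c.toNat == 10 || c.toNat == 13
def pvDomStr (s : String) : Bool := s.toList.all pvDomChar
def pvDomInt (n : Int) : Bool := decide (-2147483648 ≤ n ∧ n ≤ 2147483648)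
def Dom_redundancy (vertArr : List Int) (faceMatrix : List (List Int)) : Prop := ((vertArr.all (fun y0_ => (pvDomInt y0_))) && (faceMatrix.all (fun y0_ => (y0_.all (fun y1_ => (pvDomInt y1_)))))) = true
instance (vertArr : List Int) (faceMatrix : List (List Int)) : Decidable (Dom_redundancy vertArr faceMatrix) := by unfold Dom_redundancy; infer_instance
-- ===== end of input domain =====

-- B fuses A's separate solChecker validation pass into the counting loop (single scan over faceMatrix); return value proved equal.

-- ===== PORT A =====
-- solChecker: for each face, tests the comprehension [i for i in vertArr if i in face] for emptiness
def solChecker (vertArr : List Int) (faceMatrix : List (List Int)) : Bool :=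
  match faceMatrix with
  | [] => true
  | face :: rest =>
      if (vertArr.filter (fun i => face.contains i)).length = 0 then false
      else solChecker vertArr rest

def redundancy (vertArr : List Int) (faceMatrix : List (List Int)) : Int :=
  if !(solChecker vertArr faceMatrix) then -1
  else
    faceMatrix.foldl
      (fun redund face =>
        let numOfVertsToching : Int :=
          vertArr.foldl (fun acc vert => if face.contains vert then acc + 1 else acc) 0
        if numOfVertsToching > 1 then redund + 1 else redund)
      0

-- ===== PORT B =====
def redAltLoop (vertArr : List Int) (faces : List (List Int)) (redund : Int) : Int :=
  match faces with
  | [] => redund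
  | face :: rest =>
      let touching : Int := vertArr.countP (fun v => face.contains v)
      if touching = 0 then -1
      else redAltLoop vertArr rest (if touching > 1 then redund + 1 else redund)

def redundancy_alt (vertArr : List Int) (faceMatrix : List (List Int)) : Int :=
  redAltLoop vertArr faceMatrix 0

-- ===== PRECONDITION & SPEC =====
def Spec_redundancy (vertArr : List Int) (faceMatrix : List (List Int)) (out : Int) : Prop := out = redundancy_alt vertArr faceMatrix
instance (vertArr : List Int) (faceMatrix : List (List Int)) (out : Int) : Decidable (Spec_redundancy vertArr faceMatrix out) := by unfold Spec_redundancy; infer_instance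

-- ===== CLAIM (what is proved, stated in full; the proofs are below) =====
def Claim_equal_redundancy : Prop := ∀ (vertArr : List Int) (faceMatrix : List (List Int)), Dom_redundancy vertArr faceMatrix → Spec_redundancy vertArr faceMatrix (redundancy vertArr faceMatrix)

-- ===== LEMMAS AND PROOFS =====

-- A's int-accumulator count equals the Nat count cast to Int
theorem foldl_count_eq (vertArr : List Int) (face : List Int) (acc : Int) :
    vertArr.foldl (fun acc vert => if face.contains vert then acc + 1 else acc) acc
      = acc + (vertArr.countP (fun v => face.contains v) : Int) := by
  induction vertArr generalizing acc with
  | nil => simp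
  | cons v vs ih =>
      simp only [List.foldl, List.countP_cons, ih]
      by_cases h : face.contains v = true
      · simp only [h, if_pos]; push_cast; ring
      · simp only [h]; simp

-- filter-length (solChecker's test) equals countP
theorem filter_len_eq (vertArr : List Int) (face : List Int) :
    (vertArr.filter (fun i => face.contains i)).length = vertArr.countP (fun v => face.contains v) := by
  simp [List.countP_eq_length_filter]

-- fused loop vs validate-then-count, by induction on faces generalizing the accumulator
theorem redAlt_eq (vertArr : List Int) (faces : List (List Int)) (r : Int) :
    redAltLoop vertArr faces r =
      if !(solChecker vertArr faces) then -1
      else faces.foldl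
        (fun redund face =>
          let numOfVertsToching : Int :=
            vertArr.foldl (fun acc vert => if face.contains vert then acc + 1 else acc) 0
          if numOfVertsToching > 1 then redund + 1 else redund)
        r := by
  induction faces generalizing r with
  | nil => simp [redAltLoop, solChecker]
  | cons face rest ih =>
      simp only [redAltLoop, solChecker, List.foldl, foldl_count_eq, filter_len_eq, zero_add, ih]
      by_cases h0 : vertArr.countP (fun v => face.contains v) = 0
      · have h0' : (vertArr.countP (fun v => face.contains v) : Int) = 0 := by exact_mod_cast h0
        rw [if_pos h0', if_pos h0]; simp
      · have h0' : (vertArr.countP (fun v => face.contains v) : Int) ≠ 0 := by exact_mod_cast h0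
        rw [if_neg h0', if_neg h0]

-- ===== VERDICT (by name: the statement is the Claim_ definition above) =====
theorem redundancy_spec : Claim_equal_redundancy := by
  intro vertArr faceMatrix _
  unfold Spec_redundancy redundancy redundancy_alt
  rw [redAlt_eq]
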